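-- pv_equiv track=rewrite | github.com/ajarac/advent_of_code | 2015/day03/solution.py | part2
-- ===== SOURCE A (Python) =====
-- def part2(input_text: str) -> str:
--     positions = [(0, 0), (0, 0)]
--     visited = set()
--     visited.add((0, 0))
--     for i, move in enumerate(input_text):
--         positions[i % 2] = new_position(positions[i % 2], move)
--         visited.add(positions[i % 2])
--
--     return f"number of houses visited: {len(visited)}"
--
-- def new_position(position: (int, int), move: str) -> (int, int):
--     if move == "^":
--         return position[0] + 1, position[1]
--     elif move == '>':
--         return position[0], position[1] + 1
--     elif move == '<':
--         return position[0], position[1] - 1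
--     else:
--         return position[0] - 1, position[1]
-- ===== SOURCE B (Python) =====
-- def _move(pos, c):
--     if c == "^":
--         return pos[0] + 1, pos[1]
--     if c == ">":
--         return pos[0], pos[1] + 1
--     if c == "<":
--         return pos[0], pos[1] - 1
--     return pos[0] - 1, pos[1]
--
--
-- def part2(input_text: str) -> str:
--     visited = {(0, 0)}
--     for stream in (input_text[0::2], input_text[1::2]):
--         pos = (0, 0)
--         for c in stream:
--             pos = _move(pos, c)
--             visited.add(pos)
--     return f"number of houses visited: {len(visited)}"
-- ===== Notes on version B (the rewrite author's own statement) =====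
-- stated objective: alternative
-- what changed: B splits the input into the two Santas' move streams by index-parity slicing (input_text[0::2], input_text[1::2]) and walks each stream in its own loop with one position variable each, instead of A's single interleaved loop with enumerate, i % 2 and positions[i % 2] list indexing.
import Mathlib
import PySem

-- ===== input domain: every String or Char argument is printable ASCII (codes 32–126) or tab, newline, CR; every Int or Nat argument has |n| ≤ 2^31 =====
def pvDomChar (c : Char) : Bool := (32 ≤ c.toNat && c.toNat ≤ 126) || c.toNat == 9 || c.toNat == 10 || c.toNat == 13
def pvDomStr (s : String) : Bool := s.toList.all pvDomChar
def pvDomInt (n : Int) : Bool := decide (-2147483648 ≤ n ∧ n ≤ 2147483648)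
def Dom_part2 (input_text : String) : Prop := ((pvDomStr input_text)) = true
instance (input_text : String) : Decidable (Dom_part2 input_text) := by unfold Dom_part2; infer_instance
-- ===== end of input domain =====

-- B restructures A's single interleaved loop (positions[i % 2]) into two independent walks
-- over the parity-sliced move streams input_text[0::2] and input_text[1::2] (objective: alternative).

-- ===== PORT A =====
def newPosition (position : Int × Int) (move : Char) : Int × Int :=
  if move = '^' then (position.1 + 1, position.2)
  else if move = '>' then (position.1, position.2 + 1)
  else if move = '<' then (position.1, position.2 - 1)
  else (position.1 - 1, position.2)

def part2Step (st : (Int × Int) × (Int × Int) × PySem.Set (Int × Int)) (ic : Int × Char) :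
    (Int × Int) × (Int × Int) × PySem.Set (Int × Int) :=
  if PySem.Int.mod ic.1 2 == 0 then
    let p := newPosition st.1 ic.2
    (p, st.2.1, PySem.Set.add st.2.2 p)
  else
    let p := newPosition st.2.1 ic.2
    (st.1, p, PySem.Set.add st.2.2 p)

def part2 (input_text : String) : String :=
  let res := (PySem.List.enumerate input_text.toList).foldl part2Step
      (((0, 0)), ((0, 0)), PySem.Set.add PySem.Set.empty (0, 0))
  "number of houses visited: " ++ PySem.Int.toStr (PySem.Set.len res.2.2)

-- ===== PORT B =====
def moveAlt (pos : Int × Int) (c : Char) : Int × Int :=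
  if c = '^' then (pos.1 + 1, pos.2)
  else if c = '>' then (pos.1, pos.2 + 1)
  else if c = '<' then (pos.1, pos.2 - 1)
  else (pos.1 - 1, pos.2)

def walkStream (v : PySem.Set (Int × Int)) (stream : List Char) : PySem.Set (Int × Int) :=
  (stream.foldl
    (fun (st : (Int × Int) × PySem.Set (Int × Int)) c =>
      let p := moveAlt st.1 c
      (p, PySem.Set.add st.2 p))
    (((0 : Int), (0 : Int)), v)).2

def part2_alt (input_text : String) : String :=
  let santa := (PySem.List.slice? input_text.toList (some 0) none 2).getD []
  let robo := (PySem.List.slice? input_text.toList (some 1) none 2).getD []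
  let visited := [santa, robo].foldl walkStream (PySem.Set.ofList [(((0 : Int), (0 : Int)))])
  "number of houses visited: " ++ PySem.Int.toStr (PySem.Set.len visited)

-- ===== PRECONDITION & SPEC =====
def Spec_part2 (input_text : String) (out : String) : Prop := out = part2_alt input_text
instance (input_text : String) (out : String) : Decidable (Spec_part2 input_text out) := by unfold Spec_part2; infer_instance

-- ===== CLAIM (what is proved, stated in full; the proofs are below) =====
def Claim_equal_part2 : Prop := ∀ (input_text : String), Dom_part2 input_text → Spec_part2 input_text (part2 input_text)

-- ===== LEMMAS AND PROOFS =====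

/-- successive positions reached when walking `cs` from `p`. -/
def trail : (Int × Int) → List Char → List (Int × Int)
  | _, [] => []
  | p, c :: cs => newPosition p c :: trail (newPosition p c) cs

/-- elements at even indices. -/
def everyOther {α : Type} : List α → List α
  | [] => []
  | [x] => [x]
  | x :: _ :: r => x :: everyOther r

lemma everyOther_cons {α : Type} (c : α) (cs : List α) :
    everyOther (c :: cs) = c :: everyOther cs.tail := by
  cases cs <;> rfl

lemma moveAlt_eq : moveAlt = newPosition := rfl

lemma filterMap_range_two {α : Type} (xs : List α) :
    List.filterMap (fun k : Nat => xs[2 * k]?) (List.range ((xs.length + 1) / 2)) = everyOther xs := by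
  induction xs using everyOther.induct with
  | case1 => simp [everyOther]
  | case2 x => simp [everyOther, List.range_succ]
  | case3 x y r ih =>
    have hlen : ((x :: y :: r).length + 1) / 2 = (r.length + 1) / 2 + 1 := by
      simp [List.length_cons]; omega
    rw [hlen, List.range_succ_eq_map, List.filterMap_cons, List.filterMap_map]
    simp only [Function.comp]
    have : (List.filterMap (fun k : Nat => (x :: y :: r)[2 * (k + 1)]?) (List.range ((r.length + 1) / 2)))
        = List.filterMap (fun k : Nat => r[2 * k]?) (List.range ((r.length + 1) / 2)) := by
      apply List.filterMap_congr
      intro k _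
      have : 2 * (k + 1) = 2 * k + 2 := by omega
      simp [this]
    simp [everyOther, this, ih]

lemma sliceIndices0 (n : Nat) : PySem.List.sliceIndices n (some 0) none 2 = (0, (n : Int), 2) := by
  simp [PySem.List.sliceIndices]

lemma slice0 {α : Type} (xs : List α) :
    (PySem.List.slice? xs (some 0) none 2).getD [] = everyOther xs := by
  rw [PySem.List.slice?]
  simp only [sliceIndices0]
  norm_num
  have hc : ∀ m : Nat, (if 0 < m then (((m:Int) + 2 - 1) / 2).toNat else 0) = (m + 1) / 2 := by
    intro m; split <;> omega
  rw [hc]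
  rw [← filterMap_range_two xs]
  apply List.filterMap_congr
  intro k _
  have : ((2:Int) * (k:Int)).toNat = 2 * k := by omega
  rw [this]

lemma slice1 {α : Type} (xs : List α) :
    (PySem.List.slice? xs (some 1) none 2).getD [] = everyOther xs.tail := by
  cases xs with
  | nil => rfl
  | cons x r =>
    rw [PySem.List.slice?]
    simp only [PySem.List.sliceIndices]
    norm_num
    have hc : ∀ m : Nat, (if 0 < m then (((m:Int) + 2 - 1) / 2).toNat else 0) = (m + 1) / 2 := by
      intro m; split <;> omega
    rw [hc, ← filterMap_range_two r]
    apply List.filterMap_congr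
    intro k _
    have h1 : ((1:Int) + 2 * (k:Int)).toNat = 2 * k + 1 := by omega
    rw [h1]
    simp

lemma A_mem (cs : List Char) (n : Nat) (p0 p1 : Int × Int) (v : PySem.Set (Int × Int)) (x : Int × Int) :
    (x ∈ ((PySem.List.enumerate cs (n : Int)).foldl part2Step (p0, p1, v)).2.2) ↔
      x ∈ v ∨ (if n % 2 = 0
               then x ∈ trail p0 (everyOther cs) ∨ x ∈ trail p1 (everyOther cs.tail)
               else x ∈ trail p1 (everyOther cs) ∨ x ∈ trail p0 (everyOther cs.tail)) := by
  induction cs generalizing n p0 p1 v with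
  | nil => simp [PySem.List.enumerate_nil]; split <;> simp [trail, everyOther]
  | cons c cs ih =>
    rw [PySem.List.enumerate_cons, List.foldl_cons]
    have hcast : ((n : Int) + 1) = ((n + 1 : Nat) : Int) := by push_cast; ring
    by_cases h : n % 2 = 0
    · have hm : (PySem.Int.mod (n : Int) 2 == 0) = true := by
        simp [PySem.Int.mod, Int.fmod_eq_emod]; omega
      have hstep : part2Step (p0, p1, v) ((n : Int), c)
          = (newPosition p0 c, p1, PySem.Set.add v (newPosition p0 c)) := by
        unfold part2Step; rw [hm]; simp
      rw [hstep, hcast, ih]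
      have h1 : (n + 1) % 2 ≠ 0 := by omega
      simp only [h, h1, everyOther_cons, List.tail_cons]
      simp [trail, PySem.Set.mem_add]
      tauto
    · have hm : (PySem.Int.mod (n : Int) 2 == 0) = false := by
        simp [PySem.Int.mod, Int.fmod_eq_emod]; omega
      have hstep : part2Step (p0, p1, v) ((n : Int), c)
          = (p0, newPosition p1 c, PySem.Set.add v (newPosition p1 c)) := by
        unfold part2Step; rw [hm]; simp
      rw [hstep, hcast, ih]
      have h1 : (n + 1) % 2 = 0 := by omega
      simp only [h, h1, everyOther_cons, List.tail_cons]
      simp [trail, PySem.Set.mem_add]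
      tauto

lemma A_nodup (l : List (Int × Char)) (p0 p1 : Int × Int) (v : PySem.Set (Int × Int))
    (hv : v.Nodup) : (l.foldl part2Step (p0, p1, v)).2.2.Nodup := by
  induction l generalizing p0 p1 v with
  | nil => exact hv
  | cons ic l ih =>
    rw [List.foldl_cons]
    rcases hs : part2Step (p0, p1, v) ic with ⟨q0, q1, w⟩
    have hw : w.Nodup := by
      simp [part2Step] at hs
      split at hs <;> (cases hs; exact PySem.Set.nodup_add _ _ hv)
    exact ih q0 q1 w hw

lemma walk_mem (cs : List Char) (v : PySem.Set (Int × Int)) (x : Int × Int) :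
    x ∈ walkStream v cs ↔ x ∈ v ∨ x ∈ trail (0, 0) cs := by
  unfold walkStream
  generalize ((0 : Int), (0 : Int)) = p
  induction cs generalizing p v with
  | nil => simp [trail]
  | cons c cs ih =>
    rw [List.foldl_cons, ih]
    simp [trail, moveAlt_eq, PySem.Set.mem_add]
    tauto
lemma walk_nodup_aux (cs : List Char) (p : Int × Int) (v : PySem.Set (Int × Int)) (hv : v.Nodup) :
    (cs.foldl
      (fun (st : (Int × Int) × PySem.Set (Int × Int)) c =>
        let q := moveAlt st.1 c
        (q, PySem.Set.add st.2 q)) (p, v)).2.Nodup := by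
  induction cs generalizing p v with
  | nil => exact hv
  | cons c cs ih => exact ih _ _ (PySem.Set.nodup_add _ _ hv)

lemma walk_nodup (cs : List Char) (v : PySem.Set (Int × Int)) (hv : v.Nodup) :
    (walkStream v cs).Nodup := walk_nodup_aux cs _ v hv

theorem part2_spec : Claim_equal_part2 := by
  intro s _
  unfold Spec_part2 part2 part2_alt
  simp only [List.foldl_cons, List.foldl_nil, slice0, slice1]
  have hA : (List.foldl part2Step ((0, 0), (0, 0), PySem.Set.empty.add (0, 0))
      (PySem.List.enumerate s.toList)).2.2.Nodup :=
    A_nodup _ _ _ _ (by decide)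
  have hB : (walkStream (walkStream (PySem.Set.ofList [(((0 : Int), (0 : Int)))])
      (everyOther s.toList)) (everyOther s.toList.tail)).Nodup :=
    walk_nodup _ _ (walk_nodup _ _ (PySem.Set.nodup_ofList _))
  have hperm : (List.foldl part2Step ((0, 0), (0, 0), PySem.Set.empty.add (0, 0))
        (PySem.List.enumerate s.toList)).2.2.Perm
      (walkStream (walkStream (PySem.Set.ofList [(((0 : Int), (0 : Int)))])
        (everyOther s.toList)) (everyOther s.toList.tail)) := by
    rw [List.perm_ext_iff_of_nodup hA hB]
    intro x
    have h0 : ((0 : Int)) = ((0 : Nat) : Int) := rfl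
    rw [show PySem.List.enumerate s.toList = PySem.List.enumerate s.toList ((0 : Nat) : Int) from rfl]
    rw [A_mem, walk_mem, walk_mem, PySem.Set.mem_ofList]
    have hinit : x ∈ PySem.Set.add PySem.Set.empty ((0 : Int), (0 : Int)) ↔ x = (0, 0) := by
      rw [PySem.Set.mem_add]; simp [PySem.Set.empty]
    rw [hinit]
    simp only [Nat.zero_mod, List.mem_singleton, if_true]
    tauto
  congr 1
  apply congrArg
  simp only [PySem.Set.len]
  exact_mod_cast hperm.length_eq
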